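-- pv_equiv track=rewrite | github.com/asosa1/ClingoParallelSolver | pythonshell.py | updateagents
-- ===== SOURCE A (Python) =====
-- def find_between_r( s, first, last ):
--     try:
--         start = s.rindex( first ) + len( first )
--         end = s.find( last, start )
--         return s[start:end]
--     except ValueError:
--         return ""
--
-- def updateagents(output, numagents, server, offset):
-- 	newagents = ''
-- 	for i in range(numagents):
-- 		start = "move("
-- 		start = (start + str(i + offset))
-- 		result = find_between_r(output, start, ")")
--
-- 		if result:
-- 			a = result.rfind(',')
-- 			b = result.rfind(',', 0, a)
-- 			result = result[b+1:a]
-- 			agent = "agent(" + str(i + offset) + ", " + server + ", " + result + ", a). "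
-- 			newagents += agent + " "
-- 		else:
-- 			start = "agent(" + str(i + offset)
-- 			result = find_between_r(output, start, ")")
-- 			result = start + result + ")."
-- 			newagents += result + " "
-- 	return newagents
-- ===== SOURCE B (Python) =====
-- def updateagents(output, numagents, server, offset):
--     # One pass builds position indexes for the two tags; each agent then scans only
--     # those candidate positions (backwards, for the last occurrence) instead of
--     # re-scanning the whole output with rindex for every agent.
--     n = len(output)
--     moves = [j for j in range(n) if output.startswith("move(", j)]
--     agentpos = [j for j in range(n) if output.startswith("agent(", j)]
--     pieces = []
--     for i in range(numagents):
--         num = str(i + offset)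
--         piece = None
--         j = next((j for j in reversed(moves) if output.startswith(num, j + 5)), None)
--         if j is not None:
--             start = j + 5 + len(num)
--             result = output[start:output.find(")", start)]
--             if result:
--                 a = result.rfind(',')
--                 b = result.rfind(',', 0, a)
--                 piece = "agent(" + num + ", " + server + ", " + result[b + 1:a] + ", a).  "
--         if piece is None:
--             key = "agent(" + num
--             j = next((j for j in reversed(agentpos) if output.startswith(num, j + 6)), None)
--             mid = "" if j is None else output[j + 6 + len(num):output.find(")", j + 6 + len(num))]
--             piece = key + mid + "). "
--         pieces.append(piece)
--     return "".join(pieces)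
-- ===== Notes on version B (the rewrite author's own statement) =====
-- stated objective: faster
-- what changed: Instead of re-scanning the whole output with rindex for every agent, B builds the positions of "move("/"agent(" in one pass and, per agent, scans only those candidate positions backwards for the last occurrence, assembling the result with a list join instead of repeated string concatenation.
import Mathlib
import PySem

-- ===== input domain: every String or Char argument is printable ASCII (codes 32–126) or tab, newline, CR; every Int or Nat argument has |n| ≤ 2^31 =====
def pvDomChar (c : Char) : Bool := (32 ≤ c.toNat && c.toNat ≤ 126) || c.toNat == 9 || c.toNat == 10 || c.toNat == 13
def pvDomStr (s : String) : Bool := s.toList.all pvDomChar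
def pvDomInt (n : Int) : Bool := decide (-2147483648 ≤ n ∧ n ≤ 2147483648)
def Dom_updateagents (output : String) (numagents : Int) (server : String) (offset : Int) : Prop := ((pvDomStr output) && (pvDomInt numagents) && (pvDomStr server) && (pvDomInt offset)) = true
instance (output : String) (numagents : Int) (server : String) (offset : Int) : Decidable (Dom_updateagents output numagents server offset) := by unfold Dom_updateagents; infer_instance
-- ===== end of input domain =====

-- B replaces A's per-agent rindex scan of the whole output by one precomputed
-- position index for the two tags, scanned backwards per agent (objective: faster).

-- ===== PORT A =====
-- find_between_r: the try/except ValueError around s.rindex is ported as the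
-- -1 test on rfind (rindex raises exactly where rfind returns -1).
def findBetweenR (s first last : String) : String :=
  let r := PySem.Str.rfind s first
  if r = -1 then ""
  else
    let start := r + PySem.Str.len first
    let e := PySem.Str.findFrom s last start
    PySem.Str.slice s (some start) (some e)

def updateagents (output : String) (numagents : Int) (server : String) (offset : Int) : String :=
  (PySem.List.pyRange 0 numagents).foldl (fun newagents i =>
    let start := "move(" ++ PySem.Int.toStr (i + offset)
    let result := findBetweenR output start ")"
    if result ≠ "" then
      let a := PySem.Str.rfind result ","
      let b := PySem.Str.rfindFrom result "," 0 (some a)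
      let result := PySem.Str.slice result (some (b + 1)) (some a)
      let agent := "agent(" ++ PySem.Int.toStr (i + offset) ++ ", " ++ server ++ ", " ++ result ++ ", a). "
      newagents ++ (agent ++ " ")
    else
      let start2 := "agent(" ++ PySem.Int.toStr (i + offset)
      let result2 := findBetweenR output start2 ")"
      let result3 := start2 ++ result2 ++ ")."
      newagents ++ (result3 ++ " ")) ""

-- ===== PORT B =====
-- next((j for j in reversed(l) if output.startswith(num, j + t)), None)
def pvFirstHit (s : List Char) (num : List Char) (t : Nat) (rev : List Int) : Option Int :=
  match rev with
  | [] => none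
  | j :: rest =>
    if PySem.Chars.startswith (s.drop (j.toNat + t)) num then some j else pvFirstHit s num t rest

def updateagents_alt (output : String) (numagents : Int) (server : String) (offset : Int) : String :=
  let s := output.toList
  let moves := (PySem.List.pyRange 0 (s.length : Int)).filter
      (fun j => PySem.Chars.startswith (s.drop j.toNat) "move(".toList)
  let agentpos := (PySem.List.pyRange 0 (s.length : Int)).filter
      (fun j => PySem.Chars.startswith (s.drop j.toNat) "agent(".toList)
  let pieces := (PySem.List.pyRange 0 numagents).foldl (fun pieces i =>
    let num := PySem.Int.toStr (i + offset)
    let piece : Option String :=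
      match pvFirstHit s num.toList 5 moves.reverse with
      | none => none
      | some j =>
        let start := j + 5 + PySem.Str.len num
        let result := PySem.Str.slice output (some start) (some (PySem.Str.findFrom output ")" start))
        if result ≠ "" then
          let a := PySem.Str.rfind result ","
          let b := PySem.Str.rfindFrom result "," 0 (some a)
          some ("agent(" ++ num ++ ", " ++ server ++ ", " ++
                PySem.Str.slice result (some (b + 1)) (some a) ++ ", a).  ")
        else none
    let piece2 :=
      match piece with
      | some p => p
      | none =>
        let key := "agent(" ++ num
        let mid :=
          match pvFirstHit s num.toList 6 agentpos.reverse with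
          | none => ""
          | some j =>
            let start := j + 6 + PySem.Str.len num
            PySem.Str.slice output (some start) (some (PySem.Str.findFrom output ")" start))
        key ++ mid ++ "). "
    pieces ++ [piece2]) []
  PySem.Str.join "" pieces

-- ===== PRECONDITION & SPEC =====
def Spec_updateagents (output : String) (numagents : Int) (server : String) (offset : Int) (out : String) : Prop := out = updateagents_alt output numagents server offset
instance (output : String) (numagents : Int) (server : String) (offset : Int) (out : String) : Decidable (Spec_updateagents output numagents server offset out) := by unfold Spec_updateagents; infer_instance

-- ===== CLAIM (what is proved, stated in full; the proofs are below) =====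
def Claim_equal_updateagents : Prop := ∀ (output : String) (numagents : Int) (server : String) (offset : Int), Dom_updateagents output numagents server offset → Spec_updateagents output numagents server offset (updateagents output numagents server offset)

-- ===== LEMMAS AND PROOFS =====

-- rfind.go scans positions m, m-1, …, 0 and returns the first (= highest) hit
theorem pv_go_eq (s sub : List Char) (m : Nat) :
    PySem.Chars.rfind.go s sub m =
      (match (List.range (m+1)).reverse.find? (fun j => sub.isPrefixOf (s.drop j)) with
       | some j => (j : Int)
       | none => -1) := by
  induction m with
  | zero =>
    by_cases h : sub.isPrefixOf s
    · simp [PySem.Chars.rfind.go, List.range_succ, h]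
    · simp [PySem.Chars.rfind.go, List.range_succ, h]
  | succ m ih =>
    rw [show List.range (m+1+1) = List.range (m+1) ++ [m+1] from List.range_succ]
    simp only [List.reverse_append, List.reverse_cons, List.reverse_nil, List.nil_append,
      List.cons_append, List.find?_cons]
    by_cases h : sub.isPrefixOf (s.drop (m+1))
    · simp [PySem.Chars.rfind.go, h]
    · simp [PySem.Chars.rfind.go, h, ih]

theorem pv_isPrefixOf_decide (a l : List Char) : a.isPrefixOf l = decide (a <+: l) := by
  cases hb : a.isPrefixOf l
  · have : ¬ a <+: l := by rw [← List.isPrefixOf_iff_prefix, hb]; simp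
    simp [this]
  · have : a <+: l := List.isPrefixOf_iff_prefix.mp hb
    simp [this]

theorem pv_prefix_append (tag num l : List Char) :
    (tag ++ num).isPrefixOf l = (tag.isPrefixOf l && num.isPrefixOf (l.drop tag.length)) := by
  induction tag generalizing l with
  | nil => simp
  | cons t ts ih =>
    cases l with
    | nil => simp
    | cons x xs => simp [List.isPrefixOf, ih, Bool.and_assoc]

theorem pv_firstHit_map (s num : List Char) (t : Nat) (l : List Nat) :
    pvFirstHit s num t (List.map (fun (k : Nat) => (k : Int)) l) =
      Option.map (fun (k : Nat) => (k : Int))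
        (l.find? (fun j => PySem.Chars.startswith (s.drop (j + t)) num)) := by
  induction l with
  | nil => simp [pvFirstHit]
  | cons j rest ih =>
    rw [List.map_cons, List.find?_cons]
    by_cases h : PySem.Chars.startswith (s.drop (j + t)) num
    · simp only [pvFirstHit, Int.toNat_natCast, h, if_pos, Option.map_some]
    · simp [pvFirstHit, h, ih]

-- the backwards scan over the precomputed tag positions finds exactly the
-- position rfind(tag ++ num) finds
theorem pv_hit_eq (s tag num : List Char) (htag : tag ≠ []) :
    pvFirstHit s num tag.length
      (((PySem.List.pyRange 0 (s.length : Int)).filter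
          (fun j => PySem.Chars.startswith (s.drop j.toNat) tag)).reverse) =
    (if PySem.Chars.rfind s (tag ++ num) = -1 then none
     else some (PySem.Chars.rfind s (tag ++ num))) := by
  have hpred : (fun j => (tag ++ num).isPrefixOf (s.drop j)) =
      (fun j => tag.isPrefixOf (s.drop j) && num.isPrefixOf (s.drop (j + tag.length))) := by
    funext j
    rw [pv_prefix_append, List.drop_drop, Nat.add_comm]
  rw [PySem.List.pyRange_zero_natCast, List.filter_map]
  rw [← List.map_reverse, ← List.filter_reverse]
  have hpf : ((fun j => PySem.Chars.startswith (s.drop j.toNat) tag) ∘ (fun k : Nat => (k : Int))) =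
      (fun j : Nat => PySem.Chars.startswith (s.drop j) tag) := by
    funext j; simp
  rw [hpf, pv_firstHit_map, List.find?_filter]
  rw [show PySem.Chars.rfind s (tag ++ num) = PySem.Chars.rfind.go s (tag ++ num) s.length from rfl,
      pv_go_eq]
  rw [show List.range (s.length + 1) = List.range s.length ++ [s.length] from List.range_succ]
  simp only [List.reverse_append, List.reverse_cons, List.reverse_nil, List.nil_append,
    List.cons_append, List.find?_cons]
  have hlast : (tag ++ num).isPrefixOf (s.drop s.length) = false := by
    rw [List.drop_length]
    cases tag with
    | nil => exact absurd rfl htag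
    | cons a as => simp
  rw [hlast]
  have hpred2 : (fun j : Nat => (tag ++ num).isPrefixOf (s.drop j)) =
      (fun j : Nat =>
        decide ((fun j : Nat => PySem.Chars.startswith (s.drop j) tag) j = true ∧
          (fun j : Nat => PySem.Chars.startswith (s.drop (j + tag.length)) num) j = true)) := by
    rw [hpred]
    funext j
    simp [PySem.Chars.startswith, pv_isPrefixOf_decide]
  rw [← hpred2]
  cases ho : (List.range s.length).reverse.find? (fun j => (tag ++ num).isPrefixOf (s.drop j)) with
  | none => simp
  | some j => simp

-- proof-side restatement of the two per-agent contributions (m stands for i + offset)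
def pvPieceA (output server : String) (m : Int) : String :=
  let start := "move(" ++ PySem.Int.toStr m
  let result := findBetweenR output start ")"
  if result ≠ "" then
    let a := PySem.Str.rfind result ","
    let b := PySem.Str.rfindFrom result "," 0 (some a)
    let result := PySem.Str.slice result (some (b + 1)) (some a)
    let agent := "agent(" ++ PySem.Int.toStr m ++ ", " ++ server ++ ", " ++ result ++ ", a). "
    agent ++ " "
  else
    let start2 := "agent(" ++ PySem.Int.toStr m
    let result2 := findBetweenR output start2 ")"
    let result3 := start2 ++ result2 ++ ")."
    result3 ++ " "

def pvPieceB (output server : String) (m : Int) : String :=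
  let s := output.toList
  let moves := (PySem.List.pyRange 0 (s.length : Int)).filter
      (fun j => PySem.Chars.startswith (s.drop j.toNat) "move(".toList)
  let agentpos := (PySem.List.pyRange 0 (s.length : Int)).filter
      (fun j => PySem.Chars.startswith (s.drop j.toNat) "agent(".toList)
  let num := PySem.Int.toStr m
  let piece : Option String :=
    match pvFirstHit s num.toList 5 moves.reverse with
    | none => none
    | some j =>
      let start := j + 5 + PySem.Str.len num
      let result := PySem.Str.slice output (some start) (some (PySem.Str.findFrom output ")" start))
      if result ≠ "" then
        let a := PySem.Str.rfind result ","
        let b := PySem.Str.rfindFrom result "," 0 (some a)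
        some ("agent(" ++ num ++ ", " ++ server ++ ", " ++
              PySem.Str.slice result (some (b + 1)) (some a) ++ ", a).  ")
      else none
  match piece with
  | some p => p
  | none =>
    let key := "agent(" ++ num
    let mid :=
      match pvFirstHit s num.toList 6 agentpos.reverse with
      | none => ""
      | some j =>
        let start := j + 6 + PySem.Str.len num
        PySem.Str.slice output (some start) (some (PySem.Str.findFrom output ")" start))
    key ++ mid ++ "). "

-- A's find_between_r(output, tag + num, ")") through the candidate-position scan
theorem pv_fbr (output tagS num : String) (htag : tagS.toList ≠ []) :
    findBetweenR output (tagS ++ num) ")" =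
      (match pvFirstHit output.toList num.toList tagS.toList.length
          (((PySem.List.pyRange 0 (output.toList.length : Int)).filter
              (fun j => PySem.Chars.startswith (output.toList.drop j.toNat) tagS.toList)).reverse) with
       | none => ""
       | some j =>
         PySem.Str.slice output (some (j + (tagS.toList.length : Int) + PySem.Str.len num))
           (some (PySem.Str.findFrom output ")" (j + (tagS.toList.length : Int) + PySem.Str.len num)))) := by
  rw [pv_hit_eq _ _ _ htag]
  unfold findBetweenR
  rw [PySem.Str.rfind_eq, show (tagS ++ num).toList = tagS.toList ++ num.toList from String.toList_append]
  by_cases hr : PySem.Chars.rfind output.toList (tagS.toList ++ num.toList) = -1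
  · simp [hr]
  · simp only [hr, if_false]
    simp [PySem.Str.len_eq, add_assoc]

theorem pv_piece_eq (output server : String) (m : Int) :
    pvPieceA output server m = pvPieceB output server m := by
  have h5 : ("move(".toList).length = 5 := rfl
  have h6 : ("agent(".toList).length = 6 := rfl
  simp only [pvPieceA, pvPieceB]
  rw [pv_fbr output "move(" (PySem.Int.toStr m) (by decide),
      pv_fbr output "agent(" (PySem.Int.toStr m) (by decide), h5, h6]
  have hc5 : ((5 : Nat) : Int) = (5 : Int) := by norm_num
  have hc6 : ((6 : Nat) : Int) = (6 : Int) := by norm_num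
  rw [hc5, hc6]
  cases hM : pvFirstHit output.toList (PySem.Int.toStr m).toList 5
      (((PySem.List.pyRange 0 (output.toList.length : Int)).filter
          (fun j => PySem.Chars.startswith (output.toList.drop j.toNat) "move(".toList)).reverse) with
  | none =>
    rw [if_neg (by simp)]
    cases hA2 : pvFirstHit output.toList (PySem.Int.toStr m).toList 6
        (((PySem.List.pyRange 0 (output.toList.length : Int)).filter
            (fun j => PySem.Chars.startswith (output.toList.drop j.toNat) "agent(".toList)).reverse) with
    | none =>
      apply String.toList_inj.mp
      simp [List.append_assoc]
    | some j =>
      apply String.toList_inj.mp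
      simp [List.append_assoc]
  | some j =>
    by_cases hres : PySem.Str.slice output (some (j + 5 + PySem.Str.len (PySem.Int.toStr m)))
        (some (PySem.Str.findFrom output ")" (j + 5 + PySem.Str.len (PySem.Int.toStr m)))) = ""
    · apply String.toList_inj.mp
      simp at hres
      cases hA2 : pvFirstHit output.toList (PySem.Int.toStr m).toList 6
          (((PySem.List.pyRange 0 (output.toList.length : Int)).filter
              (fun j => PySem.Chars.startswith (output.toList.drop j.toNat) "agent(".toList)).reverse) with
      | none => simp [hres, List.append_assoc]
      | some j2 => simp [hres, List.append_assoc]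
    · apply String.toList_inj.mp
      simp at hres
      simp [hres, List.append_assoc]

theorem pv_join_nil : PySem.Str.join "" ([] : List String) = "" := rfl

theorem pv_join_cons (p : String) (ps : List String) :
    PySem.Str.join "" (p :: ps) = p ++ PySem.Str.join "" ps := by
  apply String.toList_inj.mp
  simp only [PySem.Str.toList_join, String.toList_append, List.map_cons]
  cases ps with
  | nil => simp [PySem.Chars.join, List.intercalate]
  | cons q qs => simp [PySem.Chars.join, List.intercalate]

theorem pv_foldl_str (g : Int → String) (L : List Int) (acc : String) :
    L.foldl (fun a i => a ++ g i) acc = acc ++ PySem.Str.join "" (L.map g) := by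
  induction L generalizing acc with
  | nil => simp [pv_join_nil]
  | cons x xs ih => simp [List.foldl_cons, ih, pv_join_cons, ← String.append_assoc]

theorem pv_main (output : String) (numagents : Int) (server : String) (offset : Int) :
    updateagents output numagents server offset = updateagents_alt output numagents server offset := by
  unfold updateagents updateagents_alt
  have hA : (fun (newagents : String) (i : Int) =>
      let start := "move(" ++ PySem.Int.toStr (i + offset)
      let result := findBetweenR output start ")"
      if result ≠ "" then
        let a := PySem.Str.rfind result ","
        let b := PySem.Str.rfindFrom result "," 0 (some a)
        let result := PySem.Str.slice result (some (b + 1)) (some a)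
        let agent := "agent(" ++ PySem.Int.toStr (i + offset) ++ ", " ++ server ++ ", " ++ result ++ ", a). "
        newagents ++ (agent ++ " ")
      else
        let start2 := "agent(" ++ PySem.Int.toStr (i + offset)
        let result2 := findBetweenR output start2 ")"
        let result3 := start2 ++ result2 ++ ")."
        newagents ++ (result3 ++ " ")) =
      fun acc i => acc ++ pvPieceA output server (i + offset) := by
    funext acc i
    simp only [pvPieceA]
    split <;> rfl
  rw [hA, pv_foldl_str]
  have hB : (PySem.List.pyRange 0 numagents).foldl
      (fun (pieces : List String) (i : Int) => pieces ++ [pvPieceB output server (i + offset)]) [] =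
      (PySem.List.pyRange 0 numagents).map (fun i => pvPieceB output server (i + offset)) :=
    PySem.List.foldl_append_singleton_eq_map _ _ []
  show _ = PySem.Str.join "" ((PySem.List.pyRange 0 numagents).foldl
      (fun (pieces : List String) (i : Int) => pieces ++ [pvPieceB output server (i + offset)]) [])
  rw [hB]
  simp only [pv_piece_eq]
  rw [String.empty_append]

-- ===== VERDICT

-- ===== VERDICT (by name: the statement is the Claim_ definition above) =====
theorem updateagents_spec : Claim_equal_updateagents := by
  intro output numagents server offset _
  unfold Spec_updateagents
  exact pv_main output numagents server offset
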